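-- pv_equiv track=rewrite | github.com/VincentLepetit/VincentLepetit.github.io | files/bibfile_cleaner.py | my_trim
-- ===== SOURCE A (Python) =====
-- def my_trim(S):
--     change = True
--     while change:
--         if S == "":
--             return ""
--         change = False
--         if S[0] == " " or S[0] == "\"":
--             S = S[1:]
--             if S == "":
--                 return ""
--             change = True
--         if S[-1] == " " or S[-1] == "\"":
--             S = S[:-1]
--             if S == "":
--                 return ""
--             change = True
--         if S[0] == "{":
--             n = 1
--             bracket_level = 1
--             for c in S[1:]:
--                 if c == "{":
--                     bracket_level += 1
--                 elif c == "}":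
--                     bracket_level -= 1
--                     if bracket_level == 0:
--                         if n == len(S)-1:
--                             S = S[1:-1]
--                             if S == "":
--                                 return ""
--                             change = True
--                         else:
--                             break
--                 n += 1
--     return S
-- ===== SOURCE B (Python) =====
-- def my_trim(S):
--     # One pre-pass builds a brace-matching table; then two index pointers
--     # shrink the window without any slicing until the very end.
--     n = len(S)
--     match = {}
--     stack = []
--     for k in range(n):
--         c = S[k]
--         if c == '{':
--             stack.append(k)
--         elif c == '}' and stack:
--             match[stack.pop()] = k
--     i, j = 0, n
--     change = True
--     while change and i < j:
--         change = False
--         if S[i] == ' ' or S[i] == '"':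
--             i += 1
--             change = True
--             if i >= j:
--                 return ""
--         if S[j - 1] == ' ' or S[j - 1] == '"':
--             j -= 1
--             change = True
--             if i >= j:
--                 return ""
--         if S[i] == '{' and match.get(i) == j - 1:
--             i += 1
--             j -= 1
--             change = True
--             if i >= j:
--                 return ""
--     return S[i:j]
-- ===== Notes on version B (the rewrite author's own statement) =====
-- stated objective: faster
-- what changed: B builds a brace-matching table in one stack pre-pass and then shrinks an index window (i, j) over the untouched string, so each trimming step is O(1) dict lookup/pointer move instead of A's per-step rescan of S[1:] and repeated slice copying; one slice is taken at the end.
import Mathlib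
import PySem

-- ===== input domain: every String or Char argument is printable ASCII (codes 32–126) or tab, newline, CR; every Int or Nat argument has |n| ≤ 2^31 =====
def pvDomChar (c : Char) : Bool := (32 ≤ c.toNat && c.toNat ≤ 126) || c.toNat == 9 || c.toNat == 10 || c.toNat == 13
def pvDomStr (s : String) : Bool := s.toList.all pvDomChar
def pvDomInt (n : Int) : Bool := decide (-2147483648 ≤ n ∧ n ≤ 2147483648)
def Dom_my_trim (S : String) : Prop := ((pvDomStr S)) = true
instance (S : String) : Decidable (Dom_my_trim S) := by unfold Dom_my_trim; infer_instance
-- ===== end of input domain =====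

-- B replaces A's repeated slicing with two index pointers over the unchanged
-- string plus one stack pre-pass that tabulates every brace match.

-- ===== PORT A =====
-- A's inner `for c in S[1:]` loop: rest = remaining chars, n/lvl as in A,
-- len = len(S); returns true iff the loop hits bracket_level 0 at n = len(S)-1
-- (A then strips S[1:-1]); false on break or loop exhaustion.
def pvScanA (rest : List Char) (n lvl len : Int) : Bool :=
  match rest with
  | [] => false
  | c :: cs =>
    if c = '{' then pvScanA cs (n + 1) (lvl + 1) len
    else if c = '}' then
      (if lvl - 1 = 0 then decide (n = len - 1) else pvScanA cs (n + 1) (lvl - 1) len)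
    else pvScanA cs (n + 1) lvl len

-- One pass of A's while-body, split in its three stages (head strip / tail
-- strip / brace strip); result = (new S, change).  A's early `return ""` on an
-- emptied string is encoded as ([], false): the loop then returns [].
def pvStep3 (S : List Char) (c : Bool) : List Char × Bool :=
  if S = [] then ([], false)
  else if S.headD ' ' = '{' ∧ pvScanA S.tail 1 1 (S.length : Int) then
    (if S.tail.dropLast = [] then ([], false) else (S.tail.dropLast, true))
  else (S, c)

def pvStep2 (S : List Char) (c : Bool) : List Char × Bool :=
  if S = [] then ([], false)
  else if S.getLastD ' ' = ' ' ∨ S.getLastD ' ' = '"' then pvStep3 S.dropLast true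
  else pvStep3 S c

def pvStep (S : List Char) : List Char × Bool :=
  if S.headD ' ' = ' ' ∨ S.headD ' ' = '"' then pvStep2 S.tail true
  else pvStep2 S false

-- A's `while change:` loop.  fuel only makes the recursion structural (one unit
-- per pass); fuel = len(S)+1 is never exhausted, since every repeated pass
-- strictly shortens S (the equivalence proof below covers every fuel value).
def pvLoopA (fuel : Nat) (S : List Char) : List Char :=
  match fuel with
  | 0 => S
  | f + 1 =>
    if S = [] then []
    else
      match pvStep S with
      | (T, true) => pvLoopA f T
      | (T, false) => T

def my_trim (S : String) : String :=
  String.ofList (pvLoopA (S.toList.length + 1) S.toList)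

-- ===== PORT B =====
-- S[i] for an index known to be in range (0 ≤ i < len S at every use)
def pvAt (S : List Char) (i : Int) : Char := PySem.List.pyGetD S i ' '

-- B's pre-pass: the `match` dict built with a stack of open-brace positions
def pvBuildM (cs : List Char) (k : Int) (d : PySem.Dict Int Int) (st : List Int) :
    PySem.Dict Int Int :=
  match cs with
  | [] => d
  | c :: rest =>
    if c = '{' then pvBuildM rest (k + 1) d (k :: st)
    else if c = '}' then
      match st with
      | [] => pvBuildM rest (k + 1) d []
      | t :: st' => pvBuildM rest (k + 1) (d.insert t k) st'
    else pvBuildM rest (k + 1) d st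

-- One pass of B's while-body, same three stages; an early `return ""` is
-- encoded as a pair with i' ≥ j' and flag false (the loop then returns the
-- empty slice).
def pvStepB3 (S : List Char) (m : PySem.Dict Int Int) (i j : Int) (c : Bool) :
    (Int × Int) × Bool :=
  if j ≤ i then ((i, j), false)
  else if pvAt S i = '{' ∧ m.get? i = some (j - 1) then
    (if j - 1 ≤ i + 1 then ((i + 1, j - 1), false) else ((i + 1, j - 1), true))
  else ((i, j), c)

def pvStepB2 (S : List Char) (m : PySem.Dict Int Int) (i j : Int) (c : Bool) :
    (Int × Int) × Bool :=
  if j ≤ i then ((i, j), false)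
  else if pvAt S (j - 1) = ' ' ∨ pvAt S (j - 1) = '"' then pvStepB3 S m i (j - 1) true
  else pvStepB3 S m i j c

def pvStepB (S : List Char) (m : PySem.Dict Int Int) (i j : Int) :
    (Int × Int) × Bool :=
  if pvAt S i = ' ' ∨ pvAt S i = '"' then pvStepB2 S m (i + 1) j true
  else pvStepB2 S m i j false

-- B's `while change and i < j:` loop, same structural fuel (= len(S)+1 at the
-- call site; each repeated pass strictly shrinks the window j - i, so it is
-- never exhausted; the equivalence proof covers every fuel value).
def pvLoopB (fuel : Nat) (S : List Char) (m : PySem.Dict Int Int) (i j : Int) : List Char :=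
  match fuel with
  | 0 => PySem.List.slice S (some i) (some j)
  | f + 1 =>
    if i < j then
      match pvStepB S m i j with
      | ((i', j'), true) => pvLoopB f S m i' j'
      | ((i', j'), false) => PySem.List.slice S (some i') (some j')
    else PySem.List.slice S (some i) (some j)

def my_trim_alt (S : String) : String :=
  String.ofList (pvLoopB (S.toList.length + 1) S.toList
    (pvBuildM S.toList 0 PySem.Dict.empty []) 0 (S.toList.length : Int))

-- ===== PRECONDITION & SPEC =====
def Spec_my_trim (S : String) (out : String) : Prop := out = my_trim_alt S
instance (S : String) (out : String) : Decidable (Spec_my_trim S out) := by unfold Spec_my_trim; infer_instance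

-- ===== CLAIM (what is proved, stated in full; the proofs are below) =====
def Claim_equal_my_trim : Prop := ∀ (S : String), Dom_my_trim S → Spec_my_trim S (my_trim S)

-- ===== LEMMAS AND PROOFS =====

-- bracket-level bookkeeping used by the proofs
def pvDelta (c : Char) : Int := if c = '{' then 1 else if c = '}' then -1 else 0

def pvBal (cs : List Char) : Int := (cs.map pvDelta).sum

-- offset of the first character at which the running bracket level
-- (starting at lvl) reaches 0
def pvFZ (cs : List Char) (lvl : Int) : Option Nat :=
  match cs with
  | [] => none
  | c :: rest =>
    if lvl + pvDelta c = 0 then some 0 else (pvFZ rest (lvl + pvDelta c)).map (· + 1)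

-- the window S[a:b]
def pvW (S : List Char) (a b : Nat) : List Char := (S.drop a).take (b - a)

theorem pvDelta_other {c : Char} (h1 : ¬ c = '{') (h2 : ¬ c = '}') : pvDelta c = 0 := by
  simp [pvDelta, h1, h2]

theorem pvFZ_cons (c : Char) (cs : List Char) (lvl : Int) :
    pvFZ (c :: cs) lvl =
      if lvl + pvDelta c = 0 then some 0 else (pvFZ cs (lvl + pvDelta c)).map (· + 1) := rfl

theorem pvScanA_iff (cs : List Char) (n lvl len : Int) (hl : 1 ≤ lvl) :
    pvScanA cs n lvl len = true ↔
      ∃ t : Nat, pvFZ cs lvl = some t ∧ n + (t : Int) = len - 1 := by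
  induction cs generalizing n lvl with
  | nil => simp [pvScanA, pvFZ]
  | cons c cs ih =>
    have hstep : ∀ d : Int, pvDelta c = d → lvl + d ≠ 0 → 1 ≤ lvl + d →
        (pvScanA cs (n + 1) (lvl + d) len = true ↔
          ∃ t : Nat, pvFZ (c :: cs) lvl = some t ∧ n + (t : Int) = len - 1) := by
      intro d hd hne hge
      rw [ih (n + 1) (lvl + d) hge, pvFZ_cons, hd, if_neg hne]
      constructor
      · rintro ⟨t, ht, hn⟩
        exact ⟨t + 1, by simp [ht], by push_cast at hn ⊢; omega⟩
      · rintro ⟨t, ht, hn⟩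
        rcases Option.map_eq_some_iff.mp ht with ⟨t', ht', rfl⟩
        exact ⟨t', ht', by push_cast at hn ⊢; omega⟩
    by_cases hc : c = '{'
    · subst hc
      rw [pvScanA, if_pos rfl]
      exact hstep 1 rfl (by omega) (by omega)
    · by_cases hc2 : c = '}'
      · subst hc2
        rw [pvScanA, if_neg (by decide), if_pos rfl]
        by_cases hz : lvl - 1 = 0
        · rw [if_pos hz]
          rw [pvFZ_cons]
          have : pvDelta '}' = -1 := rfl
          rw [this, if_pos (by omega)]
          simp only [decide_eq_true_iff]
          constructor
          · intro hn; exact ⟨0, rfl, by push_cast; omega⟩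
          · rintro ⟨t, ht, hn⟩
            injection ht with ht; subst ht
            push_cast at hn; omega
        · rw [if_neg hz]
          exact hstep (-1) rfl (by omega) (by omega)
      · rw [pvScanA, if_neg hc, if_neg hc2]
        have := hstep 0 (pvDelta_other hc hc2) (by omega) (by omega)
        rwa [add_zero] at this

theorem pvFZ_append (cs : List Char) (c : Char) (lvl : Int) :
    pvFZ (cs ++ [c]) lvl =
      match pvFZ cs lvl with
      | some t => some t
      | none => if lvl + pvBal cs + pvDelta c = 0 then some cs.length else none := by
  induction cs generalizing lvl with
  | nil => simp [pvFZ, pvBal]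
  | cons d cs ih =>
    rw [List.cons_append, pvFZ_cons, pvFZ_cons]
    by_cases hz : lvl + pvDelta d = 0
    · rw [if_pos hz, if_pos hz]
    · rw [if_neg hz, if_neg hz, ih]
      rcases h : pvFZ cs (lvl + pvDelta d) with _ | t
      · simp only [h]
        have hb : lvl + pvBal (d :: cs) + pvDelta c = (lvl + pvDelta d) + pvBal cs + pvDelta c := by
          simp [pvBal]; ring
        rw [hb]
        split_ifs <;> simp
      · simp [h]

theorem pvFZ_take (cs : List Char) (n : Nat) (lvl : Int) :
    pvFZ (cs.take n) lvl = (pvFZ cs lvl).bind (fun t => if t < n then some t else none) := by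
  induction cs generalizing n lvl with
  | nil => simp [pvFZ]
  | cons c cs ih =>
    cases n with
    | zero =>
      rw [List.take_zero]
      rcases h : pvFZ (c :: cs) lvl with _ | t <;> simp [h, pvFZ]
    | succ n =>
      rw [List.take_succ_cons, pvFZ_cons, pvFZ_cons]
      by_cases hz : lvl + pvDelta c = 0
      · rw [if_pos hz, if_pos hz]; simp
      · rw [if_neg hz, if_neg hz, ih]
        rcases h : pvFZ cs (lvl + pvDelta c) with _ | t
        · simp [h]
        · simp only [h, Option.bind_some, Option.map_some]
          by_cases hlt : t < n
          · rw [if_pos hlt, if_pos (by omega : t + 1 < n + 1)]; simp [hlt]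
          · rw [if_neg hlt, if_neg (by omega : ¬ t + 1 < n + 1)]; simp [hlt]

theorem pvW_succ (S : List Char) (a p : Nat) (ha : a ≤ p) (hp : p < S.length) :
    pvW S a (p + 1) = pvW S a p ++ [S.getD p ' '] := by
  unfold pvW
  have h1 : p + 1 - a = (p - a) + 1 := by omega
  rw [h1, List.take_succ]
  congr 1
  have h2 : (S.drop a)[p - a]? = S[p]? := by
    rw [List.getElem?_drop]; congr 1; omega
  rw [h2, List.getElem?_eq_getElem hp]
  simp [List.getD, List.getElem?_eq_getElem hp]

theorem pvW_length (S : List Char) (a b : Nat) (hab : a ≤ b) (hb : b ≤ S.length) :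
    (pvW S a b).length = b - a := by
  unfold pvW
  rw [List.length_take, List.length_drop]
  omega

theorem pvW_self (S : List Char) (a : Nat) : pvW S a a = [] := by
  simp [pvW]

theorem pvW_drop (S : List Char) (a p : Nat) (hp : S.length ≤ p) :
    pvW S a p = S.drop a := by
  unfold pvW
  apply List.take_of_length_le
  rw [List.length_drop]; omega

theorem pvBal_append (xs : List Char) (c : Char) :
    pvBal (xs ++ [c]) = pvBal xs + pvDelta c := by
  simp [pvBal]

theorem pvBuildM_inv (cs : List Char) (S : List Char) (p : Nat)
    (d : PySem.Dict Int Int) (stN : List Nat)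
    (hcs : S.drop p = cs)
    (hmem : ∀ q ∈ stN, q < p ∧ S.getD q ' ' = '{' ∧ pvFZ (pvW S (q+1) p) 1 = none)
    (hlvl : ∀ r (h : r < stN.length), 1 + pvBal (pvW S (stN[r]+1) p) = (r : Int) + 1)
    (hcomp : ∀ q, q < p → S.getD q ' ' = '{' → pvFZ (pvW S (q+1) p) 1 = none → q ∈ stN)
    (hd : ∀ q : Nat,
      (q < p → S.getD q ' ' = '{' →
        d.get? (q : Int) = (pvFZ (pvW S (q+1) p) 1).map (fun t => ((q+1+t : Nat) : Int))) ∧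
      (p ≤ q → d.get? (q : Int) = none)) :
    ∀ q : Nat, q < S.length → S.getD q ' ' = '{' →
      (pvBuildM cs (p : Int) d (stN.map (fun q : Nat => (q : Int)))).get? (q : Int) =
        (pvFZ (S.drop (q+1)) 1).map (fun t => ((q+1+t : Nat) : Int)) := by
  induction cs generalizing p d stN with
  | nil =>
    intro q hq hcq
    have hple : S.length ≤ p := by
      by_contra hlt
      have : S.drop p ≠ [] := by
        apply List.ne_nil_of_length_pos
        rw [List.length_drop]; omega
      exact this hcs
    rw [pvBuildM]
    rw [(hd q).1 (by omega) hcq, pvW_drop S (q+1) p hple]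
  | cons c rest ih =>
    intro q hq hcq
    have hp : p < S.length := by
      by_contra hle
      rw [List.drop_eq_nil_of_le (by omega)] at hcs
      exact (List.cons_ne_nil c rest) hcs.symm
    have hcp : S.getD p ' ' = c := by
      have h1 : (S.drop p).headD ' ' = c := by rw [hcs]; rfl
      rwa [List.headD_eq_head?, List.head?_drop, ← List.getD_eq_getElem?_getD] at h1
    have hrest : S.drop (p + 1) = rest := by
      have : (S.drop p).tail = rest := by rw [hcs]; rfl
      rwa [List.tail_drop] at this
    have hW : ∀ a : Nat, a ≤ p → pvW S a (p+1) = pvW S a p ++ [c] := by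
      intro a ha; rw [pvW_succ S a p ha hp, hcp]
    have hfzapp : ∀ q : Nat, q + 1 ≤ p →
        pvFZ (pvW S (q+1) (p+1)) 1 =
          (match pvFZ (pvW S (q+1) p) 1 with
           | some t => some t
           | none => if 1 + pvBal (pvW S (q+1) p) + pvDelta c = 0
                     then some (pvW S (q+1) p).length else none) := by
      intro a ha; rw [hW (a+1) ha, pvFZ_append]
    have hcast : ((p : Int) + 1) = ((p + 1 : Nat) : Int) := by push_cast; ring
    have hbal_idx : ∀ r (h : r < stN.length), pvBal (pvW S (stN[r]+1) p) = (r : Int) := by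
      intro r h; have := hlvl r h; omega
    have hbal_mem : ∀ q ∈ stN, 0 ≤ pvBal (pvW S (q+1) p) := by
      intro x hxm
      rcases List.mem_iff_getElem.mp hxm with ⟨r, hr, hqr⟩
      have := hbal_idx r hr; rw [hqr] at this; omega
    rw [pvBuildM.eq_def]
    simp only []
    by_cases hco : c = '{'
    · have hdel1 : pvDelta c = 1 := by rw [hco]; decide
      rw [if_pos hco]
      have hst : ((p : Int) :: stN.map (fun q : Nat => (q : Int))) =
          (p :: stN).map (fun q : Nat => (q : Int)) := by simp
      rw [hst, hcast]
      apply ih (p+1) d (p :: stN) hrest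
      · -- hmem'
        intro x hx
        rcases List.mem_cons.mp hx with rfl | hx'
        · exact ⟨by omega, by rw [hcp, hco], by rw [pvW_self]; rfl⟩
        · obtain ⟨h1, h2, h3⟩ := hmem x hx'
          refine ⟨by omega, h2, ?_⟩
          rw [hfzapp x (by omega), h3, hdel1]
          have := hbal_mem x hx'
          rw [if_neg (by omega)]
      · -- hlvl'
        intro r hr
        cases r with
        | zero => simp only [List.getElem_cons_zero]; rw [pvW_self]; simp [pvBal]
        | succ r =>
          simp only [List.getElem_cons_succ]
          have hr' : r < stN.length := by simpa using hr
          have hmem' := hmem _ (List.getElem_mem hr')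
          rw [hW (stN[r]+1) (by omega), pvBal_append, hdel1]
          have := hlvl r hr'
          push_cast
          omega
      · -- hcomp'
        intro x hx hcx hfz
        rcases Nat.lt_succ_iff_lt_or_eq.mp hx with hx' | rfl
        · right
          rw [hfzapp x (by omega)] at hfz
          rcases hold : pvFZ (pvW S (x+1) p) 1 with _ | t
          · exact hcomp x hx' hcx hold
          · rw [hold] at hfz; simp at hfz
        · exact List.mem_cons_self
      · -- hd'
        intro x
        constructor
        · intro hx hcx
          rcases Nat.lt_succ_iff_lt_or_eq.mp hx with hx' | rfl
          · rw [(hd x).1 hx' hcx, hfzapp x (by omega)]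
            rcases hold : pvFZ (pvW S (x+1) p) 1 with _ | t
            · have hxm := hcomp x hx' hcx hold
              have := hbal_mem x hxm
              rw [hdel1, if_neg (by omega)]
            · rfl
          · rw [(hd x).2 (le_refl _), pvW_self]; rfl
        · intro hx
          exact (hd x).2 (by omega)
      · exact hq
      · exact hcq
    · by_cases hcc : c = '}'
      · rw [if_neg hco, if_pos hcc]
        cases stN with
        | nil =>
          simp only [List.map_nil]
          rw [hcast]
          apply ih (p+1) d ([] : List Nat) hrest
          · intro x hx; exact absurd hx (List.not_mem_nil)
          · intro r hr; simp at hr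
          · intro x hx hcx hfz
            have hxp : x ≠ p := by
              intro h; rw [h, hcp, hcc] at hcx; exact absurd hcx (by decide)
            have hx' : x < p := by omega
            rw [hfzapp x (by omega)] at hfz
            rcases hold : pvFZ (pvW S (x+1) p) 1 with _ | t
            · exact hcomp x hx' hcx hold
            · rw [hold] at hfz; simp at hfz
          · intro x
            constructor
            · intro hx hcx
              have hxp : x ≠ p := by
                intro h; rw [h, hcp, hcc] at hcx; exact absurd hcx (by decide)
              have hx' : x < p := by omega
              rw [(hd x).1 hx' hcx, hfzapp x (by omega)]
              rcases hold : pvFZ (pvW S (x+1) p) 1 with _ | t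
              · exact absurd (hcomp x hx' hcx hold) (List.not_mem_nil)
              · rfl
            · intro hx; exact (hd x).2 (by omega)
          · exact hq
          · exact hcq
        | cons tN stN' =>
          simp only [List.map_cons]
          rw [hcast]
          obtain ⟨htp, htc, htfz⟩ := hmem tN List.mem_cons_self
          have hdel : pvDelta c = -1 := by rw [hcc]; decide
          have hbal0 : pvBal (pvW S (tN+1) p) = 0 := by
            have := hbal_idx 0 (by simp)
            simpa using this
          apply ih (p+1) (d.insert (tN : Int) (p : Int)) stN' hrest
          · intro x hx
            obtain ⟨h1, h2, h3⟩ := hmem x (List.mem_cons_of_mem _ hx)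
            refine ⟨by omega, h2, ?_⟩
            rw [hfzapp x (by omega), h3, hdel]
            rcases List.mem_iff_getElem.mp hx with ⟨r, hr, hqr⟩
            have := hbal_idx (r+1) (by simpa using Nat.succ_lt_succ hr)
            simp only [List.getElem_cons_succ] at this
            rw [hqr] at this
            rw [if_neg (by omega)]
          · intro r hr
            have hr' : r + 1 < (tN :: stN').length := by simpa using Nat.succ_lt_succ hr
            have := hlvl (r+1) hr'
            simp only [List.getElem_cons_succ] at this
            have hmem' := hmem _ (List.mem_cons_of_mem _ (List.getElem_mem hr))
            rw [hW (stN'[r]+1) (by omega), pvBal_append, hdel]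
            push_cast at this ⊢
            omega
          · intro x hx hcx hfz
            have hxp : x ≠ p := by
              intro h; rw [h, hcp, hcc] at hcx; exact absurd hcx (by decide)
            have hx' : x < p := by omega
            rw [hfzapp x (by omega)] at hfz
            rcases hold : pvFZ (pvW S (x+1) p) 1 with _ | t
            · have hxm := hcomp x hx' hcx hold
              rcases List.mem_cons.mp hxm with rfl | hx2
              · rw [hold, hbal0, hdel, if_pos (by omega)] at hfz
                simp at hfz
              · exact hx2
            · rw [hold] at hfz; simp at hfz
          · intro x
            constructor
            · intro hx hcx
              have hxp : x ≠ p := by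
                intro h; rw [h, hcp, hcc] at hcx; exact absurd hcx (by decide)
              have hx' : x < p := by omega
              rw [PySem.Dict.get?_insert]
              by_cases hxt : x = tN
              · subst hxt
                rw [if_pos rfl, hfzapp x (by omega), htfz]
                rw [hbal0, hdel, if_pos (by omega)]
                rw [pvW_length S (x+1) p (by omega) (by omega)]
                simp only [Option.map_some]
                congr 1
                omega
              · rw [if_neg (by exact_mod_cast hxt)]
                rw [(hd x).1 hx' hcx, hfzapp x (by omega)]
                rcases hold : pvFZ (pvW S (x+1) p) 1 with _ | t
                · have hxm := hcomp x hx' hcx hold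
                  rcases List.mem_cons.mp hxm with rfl | hx2
                  · exact absurd rfl hxt
                  · rcases List.mem_iff_getElem.mp hx2 with ⟨r, hr, hqr⟩
                    have := hbal_idx (r+1) (by simpa using Nat.succ_lt_succ hr)
                    simp only [List.getElem_cons_succ] at this
                    rw [hqr] at this
                    rw [hdel, if_neg (by omega)]
                · rfl
            · intro hx
              rw [PySem.Dict.get?_insert,
                if_neg (by intro h; exact absurd (Nat.cast_inj.mp h) (by omega))]
              exact (hd x).2 (by omega)
          · exact hq
          · exact hcq
      · rw [if_neg hco, if_neg hcc, hcast]
        have hdel : pvDelta c = 0 := by simp [pvDelta, hco, hcc]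
        apply ih (p+1) d stN hrest
        · intro x hx
          obtain ⟨h1, h2, h3⟩ := hmem x hx
          refine ⟨by omega, h2, ?_⟩
          rw [hfzapp x (by omega), h3, hdel]
          have := hbal_mem x hx
          rw [if_neg (by omega)]
        · intro r hr
          have hmem' := hmem _ (List.getElem_mem hr)
          rw [hW (stN[r]+1) (by omega), pvBal_append, hdel]
          have := hlvl r hr
          omega
        · intro x hx hcx hfz
          have hxp : x ≠ p := by
            intro h; rw [h, hcp] at hcx; exact hco hcx
          have hx' : x < p := by omega
          rw [hfzapp x (by omega)] at hfz
          rcases hold : pvFZ (pvW S (x+1) p) 1 with _ | t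
          · exact hcomp x hx' hcx hold
          · rw [hold] at hfz; simp at hfz
        · intro x
          constructor
          · intro hx hcx
            have hxp : x ≠ p := by
              intro h; rw [h, hcp] at hcx; exact hco hcx
            have hx' : x < p := by omega
            rw [(hd x).1 hx' hcx, hfzapp x (by omega)]
            rcases hold : pvFZ (pvW S (x+1) p) 1 with _ | t
            · have hxm := hcomp x hx' hcx hold
              have := hbal_mem x hxm
              rw [hdel, if_neg (by omega)]
            · rfl
          · intro hx; exact (hd x).2 (by omega)
        · exact hq
        · exact hcq

theorem pvBuildM_spec (S : List Char) (q : Nat) (hq : q < S.length)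
    (hc : S.getD q ' ' = '{') :
    (pvBuildM S 0 PySem.Dict.empty []).get? (q : Int) =
      (pvFZ (S.drop (q + 1)) 1).map (fun t => ((q + 1 + t : Nat) : Int)) := by
  have h := pvBuildM_inv S S 0 PySem.Dict.empty []
    (by simp)
    (fun x hx => absurd hx (List.not_mem_nil))
    (fun r hr => absurd hr (by simp))
    (fun x hx _ _ => absurd hx (Nat.not_lt_zero x))
    (fun x => ⟨fun hx _ => absurd hx (Nat.not_lt_zero x),
               fun _ => PySem.Dict.get?_empty _⟩)
  have h2 := h q hq hc
  simpa using h2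

theorem pvLoopA_succ (f : Nat) (S : List Char) :
    pvLoopA (f + 1) S =
      (if S = [] then []
       else match pvStep S with
            | (T, true) => pvLoopA f T
            | (T, false) => T) := rfl

theorem pvLoopB_succ (f : Nat) (S : List Char) (m : PySem.Dict Int Int) (i j : Int) :
    pvLoopB (f + 1) S m i j =
      (if i < j then
        match pvStepB S m i j with
        | ((i', j'), true) => pvLoopB f S m i' j'
        | ((i', j'), false) => PySem.List.slice S (some i') (some j')
       else PySem.List.slice S (some i) (some j)) := rfl

theorem pvW_nil (S : List Char) (a b : Nat) (h : b ≤ a) : pvW S a b = [] := by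
  unfold pvW
  rw [Nat.sub_eq_zero_of_le h, List.take_zero]

theorem pvW_ne_nil (S : List Char) (a b : Nat) (hab : a < b) (hb : b ≤ S.length) :
    pvW S a b ≠ [] := by
  apply List.ne_nil_of_length_pos
  rw [pvW_length S a b (by omega) hb]; omega

theorem pvW_headD (S : List Char) (a b : Nat) (hab : a < b) (hb : b ≤ S.length) :
    (pvW S a b).headD ' ' = S.getD a ' ' := by
  unfold pvW
  rw [List.headD_eq_head?, List.head?_take, List.head?_drop]
  rw [if_neg (by omega), List.getD_eq_getElem?_getD]

theorem pvW_tail (S : List Char) (a b : Nat) : (pvW S a b).tail = pvW S (a + 1) b := by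
  unfold pvW
  rw [← List.drop_one, List.drop_take, List.drop_drop]
  congr 1 <;> omega

theorem pvW_dropLast (S : List Char) (a b : Nat) (hb : b ≤ S.length) :
    (pvW S a b).dropLast = pvW S a (b - 1) := by
  unfold pvW
  rw [List.dropLast_eq_take, List.take_take, List.length_take, List.length_drop]
  congr 1; omega

theorem pvW_getLastD (S : List Char) (a b : Nat) (hab : a < b) (hb : b ≤ S.length) :
    (pvW S a b).getLastD ' ' = S.getD (b - 1) ' ' := by
  have h1 : pvW S a b ≠ [] := pvW_ne_nil S a b hab hb
  rw [List.getLastD_eq_getLast?, List.getLast?_eq_getElem?]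
  rw [pvW_length S a b (by omega) hb]
  unfold pvW
  rw [List.getElem?_take_of_lt (by omega), List.getElem?_drop, List.getD_eq_getElem?_getD]
  congr 2; omega

theorem pvAt_natCast (S : List Char) (a : Nat) : pvAt S (a : Int) = S.getD a ' ' := by
  unfold pvAt
  rw [PySem.List.pyGetD_natCast]

-- the brace conditions of A and B agree on the window (a, b)

theorem pvC3_iff (S : List Char) (M : PySem.Dict Int Int)
    (HM : ∀ q : Nat, q < S.length → S.getD q ' ' = '{' →
      M.get? (q : Int) = (pvFZ (S.drop (q + 1)) 1).map (fun t => ((q + 1 + t : Nat) : Int)))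
    (a b : Nat) (hab : a < b) (hb : b ≤ S.length) (hc : S.getD a ' ' = '{') :
    (pvScanA (pvW S (a+1) b) 1 1 ((pvW S a b).length : Int) = true ↔
      M.get? (a : Int) = some ((b : Int) - 1)) := by
  rw [pvW_length S a b (by omega) hb]
  rw [pvScanA_iff _ _ _ _ (by omega)]
  rw [HM a (by omega) hc]
  have hwin : pvW S (a+1) b = (S.drop (a+1)).take (b - (a+1)) := rfl
  rw [hwin, pvFZ_take]
  rcases h0 : pvFZ (S.drop (a+1)) 1 with _ | t0
  · simp
  · simp only [Option.bind_some, Option.map_some]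
    constructor
    · rintro ⟨t, ht, hn⟩
      by_cases hlt : t0 < b - (a+1)
      · rw [if_pos hlt] at ht
        injection ht with ht; subst ht
        congr 1
        push_cast at hn ⊢
        omega
      · rw [if_neg hlt] at ht; exact absurd ht (by simp)
    · intro h
      injection h with h
      have hval : a + 1 + t0 = b - 1 := by
        have hb1 : (1:Int) ≤ (b:Int) := by exact_mod_cast Nat.one_le_iff_ne_zero.mpr (by omega)
        omega
      refine ⟨t0, ?_, ?_⟩
      · rw [if_pos (by omega)]
      · push_cast; omega

-- stage 3: brace strip

theorem pvStage3 (S : List Char) (M : PySem.Dict Int Int)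
    (HM : ∀ q : Nat, q < S.length → S.getD q ' ' = '{' →
      M.get? (q : Int) = (pvFZ (S.drop (q + 1)) 1).map (fun t => ((q + 1 + t : Nat) : Int)))
    (a b : Nat) (c : Bool) (hab : a ≤ b) (hb : b ≤ S.length) :
    ∃ a' b' : Nat, a ≤ a' ∧ a' ≤ b' ∧ b' ≤ b ∧
      pvStepB3 S M (a : Int) (b : Int) c = (((a' : Int), (b' : Int)), (pvStep3 (pvW S a b) c).2) ∧
      (pvStep3 (pvW S a b) c).1 = pvW S a' b' := by
  rcases Nat.eq_or_lt_of_le hab with rfl | hab'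
  · refine ⟨a, a, le_refl _, le_refl _, le_refl _, ?_, ?_⟩
    · rw [pvStepB3, if_pos (by omega), pvStep3, if_pos (pvW_nil S a a (le_refl _))]
    · rw [pvStep3, if_pos (pvW_nil S a a (le_refl _))]
      simp [pvW_nil S a a (le_refl _)]
  · have hne := pvW_ne_nil S a b hab' hb
    have hb1 : 1 ≤ b := by omega
    by_cases hhc : S.getD a ' ' = '{'
    · have hiff := pvC3_iff S M HM a b hab' hb hhc
      by_cases hscan : pvScanA (pvW S (a+1) b) 1 1 ((pvW S a b).length : Int) = true
      · have hMg : M.get? (a : Int) = some ((b : Int) - 1) := hiff.mp hscan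
        have hb2 : a + 2 ≤ b := by
          have hHM := HM a (by omega) hhc
          rw [hHM] at hMg
          rcases h0 : pvFZ (S.drop (a+1)) 1 with _ | t0
          · rw [h0] at hMg; simp at hMg
          · rw [h0] at hMg
            simp only [Option.map_some] at hMg
            injection hMg with hMg
            omega
        have hAside : pvStep3 (pvW S a b) c =
            (if pvW S (a+1) (b-1) = [] then ([], false) else (pvW S (a+1) (b-1), true)) := by
          rw [pvStep3, if_neg hne]
          rw [pvW_headD S a b hab' hb, pvW_tail, pvW_dropLast S (a+1) b hb]
          rw [if_pos ⟨hhc, hscan⟩]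
        have hBside : pvStepB3 S M (a : Int) (b : Int) c =
            (if (b:Int) - 1 ≤ (a:Int) + 1 then (((a:Int) + 1, (b:Int) - 1), false)
             else (((a:Int) + 1, (b:Int) - 1), true)) := by
          rw [pvStepB3, if_neg (by omega), pvAt_natCast, if_pos ⟨hhc, hMg⟩]
        refine ⟨a+1, b-1, by omega, by omega, by omega, ?_, ?_⟩
        · rw [hAside, hBside]
          by_cases hempty : b - 1 ≤ a + 1
          · rw [if_pos (by omega), if_pos (pvW_nil S (a+1) (b-1) (by omega))]
            simp only [Prod.mk.injEq]
            exact ⟨⟨by push_cast; ring, by push_cast; omega⟩, trivial⟩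
          · rw [if_neg (by omega), if_neg (pvW_ne_nil S (a+1) (b-1) (by omega) (by omega))]
            simp only [Prod.mk.injEq]
            exact ⟨⟨by push_cast; ring, by push_cast; omega⟩, trivial⟩
        · rw [hAside]
          by_cases hempty : b - 1 ≤ a + 1
          · rw [if_pos (pvW_nil S (a+1) (b-1) (by omega))]
            rw [pvW_nil S (a+1) (b-1) (by omega)]
          · rw [if_neg (pvW_ne_nil S (a+1) (b-1) (by omega) (by omega))]
      · have hMg : ¬ M.get? (a : Int) = some ((b : Int) - 1) := fun h => hscan (hiff.mpr h)
        refine ⟨a, b, le_refl _, by omega, le_refl _, ?_, ?_⟩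
        · rw [pvStepB3, if_neg (by omega), pvAt_natCast,
            if_neg (by rintro ⟨_, h2⟩; exact hMg h2)]
          rw [pvStep3, if_neg hne, pvW_headD S a b hab' hb, pvW_tail,
            if_neg (by rintro ⟨_, h2⟩; exact hscan h2)]
        · rw [pvStep3, if_neg hne, pvW_headD S a b hab' hb, pvW_tail,
            if_neg (by rintro ⟨_, h2⟩; exact hscan h2)]
    · refine ⟨a, b, le_refl _, by omega, le_refl _, ?_, ?_⟩
      · rw [pvStepB3, if_neg (by omega), pvAt_natCast,
          if_neg (by rintro ⟨h1, _⟩; exact hhc h1)]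
        rw [pvStep3, if_neg hne, pvW_headD S a b hab' hb,
          if_neg (by rintro ⟨h1, _⟩; exact hhc h1)]
      · rw [pvStep3, if_neg hne, pvW_headD S a b hab' hb,
          if_neg (by rintro ⟨h1, _⟩; exact hhc h1)]

theorem pvStage2 (S : List Char) (M : PySem.Dict Int Int)
    (HM : ∀ q : Nat, q < S.length → S.getD q ' ' = '{' →
      M.get? (q : Int) = (pvFZ (S.drop (q + 1)) 1).map (fun t => ((q + 1 + t : Nat) : Int)))
    (a b : Nat) (c : Bool) (hab : a ≤ b) (hb : b ≤ S.length) :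
    ∃ a' b' : Nat, a ≤ a' ∧ a' ≤ b' ∧ b' ≤ b ∧
      pvStepB2 S M (a : Int) (b : Int) c = (((a' : Int), (b' : Int)), (pvStep2 (pvW S a b) c).2) ∧
      (pvStep2 (pvW S a b) c).1 = pvW S a' b' := by
  rcases Nat.eq_or_lt_of_le hab with rfl | hab'
  · refine ⟨a, a, le_refl _, le_refl _, le_refl _, ?_, ?_⟩
    · rw [pvStepB2, if_pos (by omega), pvStep2, if_pos (pvW_nil S a a (le_refl _))]
    · rw [pvStep2, if_pos (pvW_nil S a a (le_refl _))]
      simp [pvW_nil S a a (le_refl _)]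
  · have hne := pvW_ne_nil S a b hab' hb
    have hb1 : 1 ≤ b := by omega
    have hcast : ((b : Int) - 1) = ((b - 1 : Nat) : Int) := by push_cast; omega
    rw [pvStep2, if_neg hne, pvW_getLastD S a b hab' hb, pvStepB2, if_neg (by omega), hcast,
      pvAt_natCast]
    by_cases hcond : S.getD (b-1) ' ' = ' ' ∨ S.getD (b-1) ' ' = '"'
    · rw [if_pos hcond, if_pos hcond, pvW_dropLast S a b hb]
      obtain ⟨a', b', h1, h2, h3, h4, h5⟩ := pvStage3 S M HM a (b-1) true (by omega) (by omega)
      exact ⟨a', b', h1, h2, by omega, h4, h5⟩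
    · rw [if_neg hcond, if_neg hcond]
      exact pvStage3 S M HM a b c hab hb

theorem pvStage1 (S : List Char) (M : PySem.Dict Int Int)
    (HM : ∀ q : Nat, q < S.length → S.getD q ' ' = '{' →
      M.get? (q : Int) = (pvFZ (S.drop (q + 1)) 1).map (fun t => ((q + 1 + t : Nat) : Int)))
    (a b : Nat) (hab : a < b) (hb : b ≤ S.length) :
    ∃ a' b' : Nat, a ≤ a' ∧ a' ≤ b' ∧ b' ≤ b ∧
      pvStepB S M (a : Int) (b : Int) = (((a' : Int), (b' : Int)), (pvStep (pvW S a b)).2) ∧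
      (pvStep (pvW S a b)).1 = pvW S a' b' := by
  have hne := pvW_ne_nil S a b hab hb
  have hcast : ((a : Int) + 1) = ((a + 1 : Nat) : Int) := by push_cast; ring
  rw [pvStep, pvW_headD S a b hab hb, pvStepB, pvAt_natCast]
  by_cases hcond : S.getD a ' ' = ' ' ∨ S.getD a ' ' = '"'
  · rw [if_pos hcond, if_pos hcond, pvW_tail, hcast]
    obtain ⟨a', b', h1, h2, h3, h4, h5⟩ := pvStage2 S M HM (a+1) b true (by omega) hb
    exact ⟨a', b', by omega, h2, h3, h4, h5⟩
  · rw [if_neg hcond, if_neg hcond]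
    exact pvStage2 S M HM a b false (by omega) hb

theorem pvStepB3_fact (S : List Char) (m : PySem.Dict Int Int) (i j : Int) (c : Bool)
    (i' j' : Int) (b : Bool) (h : pvStepB3 S m i j c = ((i', j'), b)) :
    i ≤ i' ∧ j' ≤ j ∧ j' - i' ≤ j - i ∧
      (b = true → (c = true ∧ i' = i ∧ j' = j ∧ i < j) ∨ j' - i' < j - i) := by
  unfold pvStepB3 at h
  split_ifs at h with h1 h2 h3 <;>
    (injection h with hp hb; injection hp with hi hj; subst hi; subst hj; subst hb)
  · exact ⟨le_refl _, le_refl _, le_refl _, by simp⟩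
  · refine ⟨by omega, by omega, by omega, by simp⟩
  · refine ⟨by omega, by omega, by omega, fun _ => Or.inr (by omega)⟩
  · exact ⟨le_refl _, le_refl _, le_refl _, fun hb => Or.inl ⟨hb, rfl, rfl, by omega⟩⟩

theorem pvStepB2_fact (S : List Char) (m : PySem.Dict Int Int) (i j : Int) (c : Bool)
    (i' j' : Int) (b : Bool) (h : pvStepB2 S m i j c = ((i', j'), b)) :
    i ≤ i' ∧ j' ≤ j ∧ j' - i' ≤ j - i ∧
      (b = true → (c = true ∧ i' = i ∧ j' = j ∧ i < j) ∨ j' - i' < j - i) := by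
  unfold pvStepB2 at h
  split_ifs at h with h1 h2
  · injection h with hp hb; injection hp with hi hj; subst hi; subst hj; subst hb
    exact ⟨le_refl _, le_refl _, le_refl _, by simp⟩
  · rcases pvStepB3_fact _ _ _ _ _ _ _ _ h with ⟨g1, g2, g3, g4⟩
    refine ⟨g1, by omega, by omega, fun hb => ?_⟩
    rcases g4 hb with ⟨_, rfl, rfl, _⟩ | g5 <;> right <;> omega
  · rcases pvStepB3_fact _ _ _ _ _ _ _ _ h with ⟨g1, g2, g3, g4⟩
    exact ⟨g1, g2, g3, g4⟩

theorem pvStepB_lt (S : List Char) (m : PySem.Dict Int Int) (i j i' j' : Int)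
    (hij : i < j) (h : pvStepB S m i j = ((i', j'), true)) :
    (j' - i').toNat < (j - i).toNat := by
  unfold pvStepB at h
  split_ifs at h with h1
  · rcases pvStepB2_fact _ _ _ _ _ _ _ _ h with ⟨g1, g2, g3, g4⟩
    rcases g4 rfl with ⟨_, rfl, rfl, _⟩ | g5 <;> omega
  · rcases pvStepB2_fact _ _ _ _ _ _ _ _ h with ⟨g1, g2, g3, g4⟩
    rcases g4 rfl with ⟨hc, _, _, _⟩ | g5
    · exact absurd hc (by simp)
    · omega

theorem pvLoop_eq_aux (n : Nat) (S : List Char) (M : PySem.Dict Int Int)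
    (HM : ∀ q : Nat, q < S.length → S.getD q ' ' = '{' →
      M.get? (q : Int) = (pvFZ (S.drop (q + 1)) 1).map (fun t => ((q + 1 + t : Nat) : Int))) :
    ∀ (a b : Nat), a ≤ b → b ≤ S.length → b - a < n →
      pvLoopA n (pvW S a b) = pvLoopB n S M (a : Int) (b : Int) := by
  induction n with
  | zero => intro a b hab hb hn; omega
  | succ n ih =>
    intro a b hab hb hn
    rcases Nat.eq_or_lt_of_le hab with rfl | hab'
    · rw [pvLoopA_succ, if_pos (pvW_nil S a a (le_refl _)), pvLoopB_succ, if_neg (by omega)]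
      rw [PySem.List.slice_natCast, Nat.sub_self, List.take_zero]
    · obtain ⟨a', b', h1, h2, h3, h4, h5⟩ := pvStage1 S M HM a b hab' hb
      rw [pvLoopA_succ, if_neg (pvW_ne_nil S a b hab' hb), pvLoopB_succ,
        if_pos (by exact_mod_cast hab')]
      rcases hstep : pvStep (pvW S a b) with ⟨T', flag⟩
      rw [hstep] at h4 h5
      simp only at h4 h5
      rw [h4]
      cases flag
      · simp only
        rw [PySem.List.slice_natCast, h5]
        rfl
      · simp only
        rw [h5]
        have hlt : b' - a' < b - a := by
          have := pvStepB_lt S M (a : Int) (b : Int) (a' : Int) (b' : Int)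
            (by exact_mod_cast hab') h4
          omega
        exact ih a' b' h2 (by omega) (by omega)

-- ===== VERDICT (by name: the statement is the Claim_ definition above) =====
theorem my_trim_spec : Claim_equal_my_trim := by
  intro S _
  unfold Spec_my_trim my_trim my_trim_alt
  have h := pvLoop_eq_aux (S.toList.length + 1) S.toList
    (pvBuildM S.toList 0 PySem.Dict.empty [])
    (fun q hq hc => pvBuildM_spec S.toList q hq hc)
    0 S.toList.length (Nat.zero_le _) (le_refl _) (by omega)
  rw [show pvW S.toList 0 S.toList.length = S.toList by simp [pvW]] at h
  rw [h]
  norm_num
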